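-- pv_equiv track=rewrite | github.com/cryptonitas/cryptonita | cryptonita/attacks/prng.py | inv_right_shift
-- ===== SOURCE A (Python) =====
-- def inv_right_shift(v, b, m):
--     '''
--         >>> from cryptonita.attacks.prng import inv_right_shift
--
--         >>> y, b, m = 524889969, 11, 0x010101
--         >>> v = y ^ ((y >> b) & m)
--
--         >>> inv_right_shift(v, b, m)
--         524889969
--
--         >>> y, b, m = 0xffffffff, 4, 0xffffffff
--         >>> v = y ^ ((y >> b) & m)
--
--         >>> inv_right_shift(v, b, m)
--         4294967295
--     '''
--     assert 0 < b < 32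
--
--     g = 0
--     i = 0
--     while i < 32:
--         g = v ^ ((g >> b) & m)
--         i += b
--
--     return g
-- ===== SOURCE B (Python) =====
-- def inv_right_shift(v, b, m):
--     # XOR-linear expansion: g = XOR_k (v >> k*b) & (m & m>>b & ... & m>>(k-1)b),
--     # one pass with an accumulated mask instead of A's feedback iteration.
--     assert 0 < b < 32
--     g = 0
--     mask = -1
--     for shift in range(0, 32, b):
--         g ^= (v >> shift) & mask
--         mask &= m >> shift
--     return g
-- ===== Notes on version B (the rewrite author's own statement) =====
-- stated objective: alternative
-- what changed: Replaces A's feedback fixed-point iteration (each step re-tempers the whole previous approximation g) by a feedback-free one-pass XOR expansion: since x -> (x>>b)&m is XOR-linear, the inverse is the XOR of (v>>k*b)&(m & m>>b & ... & m>>(k-1)b), computed with an accumulated mask and no dependence of a step's shift input on the previous result.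
import Mathlib
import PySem

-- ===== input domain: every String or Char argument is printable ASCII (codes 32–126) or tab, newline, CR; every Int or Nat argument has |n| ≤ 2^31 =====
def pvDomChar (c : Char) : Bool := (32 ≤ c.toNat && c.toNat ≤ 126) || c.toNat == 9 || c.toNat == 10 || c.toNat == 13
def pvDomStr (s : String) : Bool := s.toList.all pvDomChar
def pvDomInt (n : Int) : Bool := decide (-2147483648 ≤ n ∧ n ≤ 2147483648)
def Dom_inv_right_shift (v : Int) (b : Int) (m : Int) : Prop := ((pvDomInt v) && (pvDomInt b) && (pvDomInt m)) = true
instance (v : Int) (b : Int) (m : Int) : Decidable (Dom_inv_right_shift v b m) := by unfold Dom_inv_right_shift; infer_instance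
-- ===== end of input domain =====

-- B replaces A's feedback fixed-point iteration by a feedback-free one-pass XOR
-- expansion with an accumulated mask (same operation count; objective: alternative).

-- ===== PORT A =====
-- while-loop of A as fuel recursion; fuel 32 suffices since under Pre_ (1 <= b)
-- the loop body runs at most 32 times, so the fuel guard only makes the port total.
-- 'g >> b' is ported as 'g >>> b.toNat', exact for the b > 0 admitted by Pre_.
def pvLoopA (v b m : Int) : Nat → Int → Int → Int
  | 0, g, _ => g
  | fuel+1, g, i =>
    if i < 32 then
      pvLoopA v b m fuel (PySem.Int.bxor v (PySem.Int.band (g >>> b.toNat) m)) (i + b)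
    else g

def inv_right_shift (v : Int) (b : Int) (m : Int) : Int :=
  pvLoopA v b m 32 0 0

-- ===== PORT B =====
-- 'v >> shift' / 'm >> shift' ported as '>>> shift.toNat', exact since every
-- element of range(0, 32, b) is nonnegative for the b > 0 admitted by Pre_.
def inv_right_shift_alt (v : Int) (b : Int) (m : Int) : Int :=
  ((PySem.List.pyRange 0 32 b).foldl
    (fun (p : Int × Int) shift =>
      (PySem.Int.bxor p.1 (PySem.Int.band (v >>> shift.toNat) p.2),
       PySem.Int.band p.2 (m >>> shift.toNat)))
    (0, -1)).1

-- ===== PRECONDITION & SPEC =====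
-- Pre_ is exactly A's own guard: 'assert 0 < b < 32' raises AssertionError otherwise.
def Pre_inv_right_shift (v : Int) (b : Int) (m : Int) : Prop := 0 < b ∧ b < 32
instance (v : Int) (b : Int) (m : Int) : Decidable (Pre_inv_right_shift v b m) := by
  unfold Pre_inv_right_shift; infer_instance

def pvWitness_inv_right_shift : Int × Int × Int := (524889969, 11, 65793)

def Spec_inv_right_shift (v : Int) (b : Int) (m : Int) (out : Int) : Prop := out = inv_right_shift_alt v b m
instance (v : Int) (b : Int) (m : Int) (out : Int) : Decidable (Spec_inv_right_shift v b m out) := by unfold Spec_inv_right_shift; infer_instance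

-- ===== CLAIM (what is proved, stated in full; the proofs are below) =====
def Claim_equal_inv_right_shift : Prop := ∀ (v : Int) (b : Int) (m : Int), Dom_inv_right_shift v b m → Pre_inv_right_shift v b m → Spec_inv_right_shift v b m (inv_right_shift v b m)

-- ===== LEMMAS AND PROOFS =====

theorem pv_disj_add : ∀ x y : Nat, x &&& y = 0 → x + y = x ^^^ y := by
  intro x
  induction x using Nat.strong_induction_on with
  | _ x IH =>
    intro y h
    rcases Nat.eq_zero_or_pos x with hx | hx
    · subst hx; simp
    · have hd : x / 2 &&& y / 2 = 0 := by rw [← Nat.and_div_two, h]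
      have hIH := IH (x / 2) (by omega) (y / 2) hd
      have hb : x % 2 = 0 ∨ y % 2 = 0 := by
        by_contra hc
        push Not at hc
        have : (x &&& y) % 2 = 1 := Nat.and_mod_two_eq_one.mpr ⟨by omega, by omega⟩
        rw [h] at this; omega
      have h1 : (x ^^^ y) / 2 = x / 2 ^^^ y / 2 := Nat.xor_div_two
      have h2 : (x ^^^ y) % 2 = (x + y) % 2 := Nat.xor_mod_two_eq
      omega

theorem pv_sub_and_eq_ldiff (a n : Nat) : a - (a &&& n) = Nat.ldiff a n := by
  have h1 : Nat.ldiff a n ^^^ (a &&& n) = a := by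
    apply Nat.eq_of_testBit_eq
    intro i
    simp [Nat.testBit_xor, Nat.testBit_ldiff, Nat.testBit_and]
    cases a.testBit i <;> cases n.testBit i <;> rfl
  have h2 : Nat.ldiff a n &&& (a &&& n) = 0 := by
    apply Nat.eq_of_testBit_eq
    intro i
    simp [Nat.testBit_and, Nat.testBit_ldiff]
    cases a.testBit i <;> cases n.testBit i <;> simp
  have h3 := pv_disj_add _ _ h2
  omega

def pvToBits (x : Int) (k : Nat) : Bool :=
  if 0 ≤ x then x.toNat.testBit k else !((-x - 1).toNat.testBit k)

theorem pvToBits_inj {x y : Int} (h : ∀ k, pvToBits x k = pvToBits y k) : x = y := by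
  by_cases hx : 0 ≤ x <;> by_cases hy : 0 ≤ y
  · have : x.toNat = y.toNat := by
      apply Nat.eq_of_testBit_eq
      intro i
      have := h i
      simpa [pvToBits, hx, hy] using this
    omega
  · exfalso
    have hk := h (max (x.toNat) ((-y).toNat - 1) + 1)
    have h1 : (x.toNat).testBit (max (x.toNat) ((-y).toNat - 1) + 1) = false :=
      Nat.testBit_lt_two_pow (lt_of_le_of_lt (Nat.le_max_left _ _) (Nat.lt_two_pow_self.trans_le (Nat.pow_le_pow_right (by norm_num) (Nat.le_succ _))))
    have h2 : ((-y).toNat - 1).testBit (max (x.toNat) ((-y).toNat - 1) + 1) = false :=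
      Nat.testBit_lt_two_pow (lt_of_le_of_lt (Nat.le_max_right _ _) (Nat.lt_two_pow_self.trans_le (Nat.pow_le_pow_right (by norm_num) (Nat.le_succ _))))
    simp [pvToBits, hx, hy, h1, h2] at hk
  · exfalso
    have hk := h (max (y.toNat) ((-x).toNat - 1) + 1)
    have h1 : (y.toNat).testBit (max (y.toNat) ((-x).toNat - 1) + 1) = false :=
      Nat.testBit_lt_two_pow (lt_of_le_of_lt (Nat.le_max_left _ _) (Nat.lt_two_pow_self.trans_le (Nat.pow_le_pow_right (by norm_num) (Nat.le_succ _))))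
    have h2 : ((-x).toNat - 1).testBit (max (y.toNat) ((-x).toNat - 1) + 1) = false :=
      Nat.testBit_lt_two_pow (lt_of_le_of_lt (Nat.le_max_right _ _) (Nat.lt_two_pow_self.trans_le (Nat.pow_le_pow_right (by norm_num) (Nat.le_succ _))))
    simp [pvToBits, hx, hy, h1, h2] at hk
  · have : (-x - 1).toNat = (-y - 1).toNat := by
      apply Nat.eq_of_testBit_eq
      intro i
      have := h i
      simpa [pvToBits, hx, hy] using this
    omega

theorem pvToBits_band (x y : Int) (k : Nat) :
    pvToBits (PySem.Int.band x y) k = (pvToBits x k && pvToBits y k) := by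
  by_cases hx : 0 ≤ x <;> by_cases hy : 0 ≤ y <;>
    simp only [PySem.Int.band, pvToBits, hx, hy, if_false, if_pos]
  · simp [Nat.testBit_and]
  · rw [pv_sub_and_eq_ldiff]
    simp [Nat.testBit_ldiff]
  · rw [pv_sub_and_eq_ldiff]
    simp [Nat.testBit_ldiff, Bool.and_comm]
  · have hneg : ¬ (0:Int) ≤ -((((-x-1).toNat ||| (-y-1).toNat : Nat)) : Int) - 1 := by omega
    simp only [hneg, if_false]
    have harg : (-(-(((( -x-1).toNat ||| (-y-1).toNat : Nat)) : Int) - 1) - 1).toNat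
        = ((-x-1).toNat ||| (-y-1).toNat) := by omega
    rw [harg]
    simp [Nat.testBit_or]

theorem pvToBits_bxor (x y : Int) (k : Nat) :
    pvToBits (PySem.Int.bxor x y) k = (pvToBits x k).xor (pvToBits y k) := by
  by_cases hx : 0 ≤ x <;> by_cases hy : 0 ≤ y <;>
    simp only [PySem.Int.bxor, pvToBits, hx, hy, if_false, if_pos]
  · simp [Nat.testBit_xor]
  · have hneg : ¬ (0:Int) ≤ -(((x.toNat ^^^ (-y-1).toNat : Nat)) : Int) - 1 := by omega
    have harg : (-(-((((x.toNat ^^^ (-y-1).toNat : Nat)) : Int)) - 1) - 1).toNat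
        = (x.toNat ^^^ (-y-1).toNat) := by omega
    simp only [hneg, if_false, harg]
    simp [Nat.testBit_xor]
  · have hneg : ¬ (0:Int) ≤ -((((-x-1).toNat ^^^ y.toNat : Nat)) : Int) - 1 := by omega
    have harg : (-(-(((((-x-1).toNat ^^^ y.toNat : Nat)) : Int)) - 1) - 1).toNat
        = ((-x-1).toNat ^^^ y.toNat) := by omega
    simp only [hneg, if_false, harg]
    simp [Nat.testBit_xor]
  · simp [Nat.testBit_xor]

theorem pvToBits_shiftRight (x : Int) (t k : Nat) :
    pvToBits (x >>> t) k = pvToBits x (t + k) := by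
  by_cases hx : 0 ≤ x
  · have hrep : x = ((x.toNat : Nat) : Int) := by omega
    rw [hrep, ← Int.natCast_shiftRight]
    simp only [pvToBits, if_pos (Int.natCast_nonneg _), Int.toNat_natCast, Nat.testBit_shiftRight]
  · have hrep : x = Int.negSucc ((-x - 1).toNat) := by
      rw [Int.negSucc_eq]; omega
    rw [hrep, Int.negSucc_shiftRight]
    have h2 : ∀ n : Nat, ¬ (0:Int) ≤ Int.negSucc n := by intro n; simp [Int.negSucc_eq]; omega
    simp only [pvToBits, h2, if_false]
    have h3 : ∀ n : Nat, (-(Int.negSucc n) - 1).toNat = n := by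
      intro n; rw [Int.negSucc_eq]; omega
    rw [h3, h3]
    simp [Nat.testBit_shiftRight]

theorem pv_neg_one_shiftRight (t : Nat) : ((-1 : Int) >>> t) = -1 := by
  have : (-1 : Int) = Int.negSucc 0 := rfl
  rw [this, Int.negSucc_shiftRight]
  simp

theorem pv_bxor_shiftRight (x y : Int) (t : Nat) :
    (PySem.Int.bxor x y) >>> t = PySem.Int.bxor (x >>> t) (y >>> t) := by
  apply pvToBits_inj; intro k
  simp [pvToBits_shiftRight, pvToBits_bxor]

theorem pv_band_shiftRight (x y : Int) (t : Nat) :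
    (PySem.Int.band x y) >>> t = PySem.Int.band (x >>> t) (y >>> t) := by
  apply pvToBits_inj; intro k
  simp [pvToBits_shiftRight, pvToBits_band]

theorem pv_band_bxor_right (x y z : Int) :
    PySem.Int.band (PySem.Int.bxor x y) z
      = PySem.Int.bxor (PySem.Int.band x z) (PySem.Int.band y z) := by
  apply pvToBits_inj; intro k
  simp [pvToBits_band, pvToBits_bxor]
  cases pvToBits x k <;> cases pvToBits y k <;> cases pvToBits z k <;> rfl

theorem pv_band_assoc (x y z : Int) :
    PySem.Int.band (PySem.Int.band x y) z = PySem.Int.band x (PySem.Int.band y z) := by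
  apply pvToBits_inj; intro k
  simp [pvToBits_band, Bool.and_assoc]

theorem pv_bxor_assoc (x y z : Int) :
    PySem.Int.bxor (PySem.Int.bxor x y) z = PySem.Int.bxor x (PySem.Int.bxor y z) := by
  apply pvToBits_inj; intro k
  simp [pvToBits_bxor]

theorem pv_band_right_comm (x y z : Int) :
    PySem.Int.band (PySem.Int.band x y) z = PySem.Int.band (PySem.Int.band x z) y := by
  rw [pv_band_assoc, pv_band_assoc, PySem.Int.band_comm y z]

def pvMS (m : Int) (n : Nat) : Nat → Int
  | 0 => -1
  | k+1 => PySem.Int.band (pvMS m n k) (m >>> (k * n))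

def pvGS (v m : Int) (n : Nat) : Nat → Int
  | 0 => 0
  | k+1 => PySem.Int.bxor (pvGS v m n k) (PySem.Int.band (v >>> (k * n)) (pvMS m n k))

theorem pvMS_step (m : Int) (n : Nat) : ∀ k, pvMS m n (k+1) = PySem.Int.band (pvMS m n k >>> n) m := by
  intro k
  induction k with
  | zero => simp [pvMS, pv_neg_one_shiftRight, PySem.Int.band_neg_one, PySem.Int.band_comm]
  | succ k IH =>
    show PySem.Int.band (pvMS m n (k+1)) (m >>> ((k+1) * n))
        = PySem.Int.band (pvMS m n (k+1) >>> n) m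
    conv_rhs => rw [show pvMS m n (k+1)
        = PySem.Int.band (pvMS m n k) (m >>> (k * n)) from rfl]
    rw [pv_band_shiftRight, ← Int.shiftRight_add, show k * n + n = (k+1) * n by ring]
    rw [pv_band_right_comm, ← IH]

theorem pvStep (v m : Int) (n : Nat) : ∀ k,
    PySem.Int.bxor v (PySem.Int.band (pvGS v m n k >>> n) m) = pvGS v m n (k+1) := by
  intro k
  induction k with
  | zero =>
    show PySem.Int.bxor v (PySem.Int.band ((0:Int) >>> n) m)
        = PySem.Int.bxor 0 (PySem.Int.band (v >>> (0 * n)) (pvMS m n 0))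
    rw [Int.zero_shiftRight]
    rw [PySem.Int.band_comm 0 m, PySem.Int.band_zero, PySem.Int.bxor_zero]
    show v = PySem.Int.bxor 0 (PySem.Int.band (v >>> (0 * n)) (-1))
    rw [PySem.Int.band_neg_one, PySem.Int.bxor_comm, PySem.Int.bxor_zero]
    simp
  | succ k IH =>
    show PySem.Int.bxor v (PySem.Int.band (pvGS v m n (k+1) >>> n) m) = pvGS v m n (k+2)
    conv_lhs => rw [show pvGS v m n (k+1)
        = PySem.Int.bxor (pvGS v m n k) (PySem.Int.band (v >>> (k * n)) (pvMS m n k)) from rfl]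
    rw [pv_bxor_shiftRight, pv_band_bxor_right, ← pv_bxor_assoc, IH]
    rw [pv_band_shiftRight, ← Int.shiftRight_add, show k * n + n = (k+1) * n by ring]
    rw [pv_band_assoc, ← pvMS_step]
    rfl

theorem pvLoopA_run (v b m : Int) :
    ∀ (t fuel k : Nat) (i : Int), i = (k : Int) * b → t ≤ fuel →
      (32 ≤ i + (t : Int) * b) → (∀ t' : Nat, t' < t → i + (t' : Int) * b < 32) →
      pvLoopA v b m fuel (pvGS v m b.toNat k) i = pvGS v m b.toNat (k + t) := by
  intro t
  induction t with
  | zero =>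
    intro fuel k i hi _ h32 _
    have hge : ¬ i < 32 := by push_cast at h32; omega
    cases fuel <;> simp [pvLoopA, hge]
  | succ t IH =>
    intro fuel k i hi hle h32 hmin
    cases fuel with
    | zero => omega
    | succ f =>
      have hlt : i < 32 := by
        have := hmin 0 (by omega); push_cast at this; omega
      rw [pvLoopA, if_pos hlt, pvStep]
      have hstep := IH f (k+1) (i + b) (by push_cast; rw [hi]; ring) (by omega)
        (by push_cast at h32 ⊢; linarith [h32]) ?hmin
      · rw [hstep, show k + 1 + t = k + (t+1) by omega]
      · intro t' ht'
        have := hmin (t'+1) (by omega)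
        push_cast at this ⊢
        linarith [this]

theorem pvFoldB_run (v b m : Int) : ∀ t : Nat,
    ((List.range t).map (fun j : Nat => (0 : Int) + b * (j : Int))).foldl
      (fun (p : Int × Int) shift =>
        (PySem.Int.bxor p.1 (PySem.Int.band (v >>> shift.toNat) p.2),
         PySem.Int.band p.2 (m >>> shift.toNat)))
      (0, -1) = (pvGS v m b.toNat t, pvMS m b.toNat t) := by
  intro t
  induction t with
  | zero => simp [pvGS, pvMS]
  | succ t IH =>
    rw [List.range_succ, List.map_append, List.foldl_append, IH]
    simp only [List.map_cons, List.map_nil, List.foldl_cons, List.foldl_nil]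
    have htn : ((0 : Int) + b * (t : Int)).toNat = t * b.toNat := by
      rcases le_or_gt 0 b with hb | hb
      · conv_lhs => rw [zero_add, show b = (b.toNat : Int) by omega, ← Nat.cast_mul, Int.toNat_natCast]
        exact Nat.mul_comm _ _
      · have : b * (t : Int) ≤ 0 := by
          apply mul_nonpos_of_nonpos_of_nonneg <;> omega
        have hb0 : b.toNat = 0 := by omega
        rw [hb0]; omega
    rw [htn]
    simp only [Int.shiftRight_natCast_right]
    rfl

theorem pv_main (v b m : Int) (hpre : 0 < b ∧ b < 32) :
    inv_right_shift v b m = inv_right_shift_alt v b m := by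
  obtain ⟨hb, _hb32⟩ := hpre
  have hN1 : 1 ≤ b.toNat := by omega
  have hbN : b = (b.toNat : Int) := by omega
  set N := b.toNat with hNdef
  set C : Nat := (31 + N) / N with hCdef
  -- basic division facts
  have hC1 : C * N ≤ 31 + N := by rw [hCdef]; exact Nat.div_mul_le_self _ _
  have hC2 : 31 + N < C * N + N := by
    have h1 := Nat.div_add_mod (31 + N) N
    have h2 : (31 + N) % N < N := Nat.mod_lt _ (by omega)
    have h3 : C * N = N * ((31 + N) / N) := by rw [hCdef, Nat.mul_comm]
    omega
  have hC32 : C ≤ 32 := by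
    by_contra hc
    have h33 : 33 ≤ C := by omega
    have := Nat.mul_le_mul_right N h33
    omega
  have hCb : 32 ≤ C * N := by omega
  have hCmin : ∀ t' : Nat, t' < C → t' * N < 32 := by
    intro t' ht'
    have h1 : t' ≤ C - 1 := by omega
    have h2 := Nat.mul_le_mul_right N h1
    have h3 : (C - 1) * N = C * N - N := by
      rw [Nat.sub_mul, one_mul]
    omega
  -- B side
  have hCeq : (((32:Int) - 0 + b - 1) / b).toNat = C := by
    have h31 : (32:Int) - 0 + b - 1 = ((31 + N : Nat) : Int) := by omega
    rw [h31, hbN, ← Int.natCast_div, Int.toNat_natCast, hCdef]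
  have hBeq : inv_right_shift_alt v b m = pvGS v m N C := by
    unfold inv_right_shift_alt
    rw [PySem.List.pyRange_of_pos 0 32 hb, if_pos (by norm_num), hCeq, pvFoldB_run]
  -- A side
  have hAeq : inv_right_shift v b m = pvGS v m N C := by
    unfold inv_right_shift
    have h0 : (0:Int) = ((0:Nat):Int) * b := by simp
    have hrun := pvLoopA_run v b m C 32 0 0 h0 hC32
      (by rw [hbN]; rw [← Nat.cast_mul]; omega)
      (by intro t' ht'
          have := hCmin t' ht'
          rw [hbN]; rw [← Nat.cast_mul]; omega)
    simpa [pvGS] using hrun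
  rw [hAeq, hBeq]

-- ===== VERDICT (by name: the statement is the Claim_ definition above) =====
theorem inv_right_shift_spec : Claim_equal_inv_right_shift := by
  intro v b m _ hpre
  unfold Spec_inv_right_shift
  exact pv_main v b m hpre
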